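-- pv_equiv track=rewrite | github.com/d28khalil/Bidnology | scraper_helper.py | get_county_id
-- ===== SOURCE A (Python) =====
-- from typing import Dict, List, Optional, Any
--
-- COUNTIES = {
--     1: {"name": "Camden", "prefix": "FR-"},
--     2: {"name": "Essex", "prefix": "F-"},
--     3: {"name": "Burlington", "prefix": None},
--     6: {"name": "Cumberland", "prefix": "F-"},
--     7: {"name": "Bergen", "prefix": "F-"},
--     8: {"name": "Monmouth", "prefix": "F-"},
--     9: {"name": "Morris", "prefix": "F-"},
--     10: {"name": "Hudson", "prefix": "F-"},
--     15: {"name": "Union", "prefix": "F-"},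
--     17: {"name": "Passaic", "prefix": "F-"},
--     19: {"name": "Gloucester", "prefix": "F-"},
--     20: {"name": "Salem", "prefix": "F-"},
--     25: {"name": "Atlantic", "prefix": "F-"},
--     32: {"name": "Hunterdon", "prefix": "F-"},
--     52: {"name": "Cape May", "prefix": "F-"},
--     73: {"name": "Middlesex", "prefix": "F-"},
-- }
--
-- def get_county_id(county_name: str) -> Optional[str]:
--     """
--     Get county ID from county name (supports both short and full names).
--
--     Args:
--         county_name: County name like "Salem", "Salem County", or "Salem County, NJ"
--
--     Returns:
--         County ID as string, or None if not found
--     """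
--     # Normalize input
--     name_lower = county_name.lower().strip()
--
--     # Try exact match first
--     for county_id, info in COUNTIES.items():
--         if info["name"].lower() == name_lower:
--             return str(county_id)
--
--     # Try prefix match (handles "Salem" matching "Salem County")
--     for county_id, info in COUNTIES.items():
--         if info["name"].lower().startswith(name_lower):
--             return str(county_id)
--
--     return None
-- ===== SOURCE B (Python) =====
-- from typing import Optional
--
-- COUNTIES = {
--     1: {"name": "Camden", "prefix": "FR-"},
--     2: {"name": "Essex", "prefix": "F-"},
--     3: {"name": "Burlington", "prefix": None},
--     6: {"name": "Cumberland", "prefix": "F-"},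
--     7: {"name": "Bergen", "prefix": "F-"},
--     8: {"name": "Monmouth", "prefix": "F-"},
--     9: {"name": "Morris", "prefix": "F-"},
--     10: {"name": "Hudson", "prefix": "F-"},
--     15: {"name": "Union", "prefix": "F-"},
--     17: {"name": "Passaic", "prefix": "F-"},
--     19: {"name": "Gloucester", "prefix": "F-"},
--     20: {"name": "Salem", "prefix": "F-"},
--     25: {"name": "Atlantic", "prefix": "F-"},
--     32: {"name": "Hunterdon", "prefix": "F-"},
--     52: {"name": "Cape May", "prefix": "F-"},
--     73: {"name": "Middlesex", "prefix": "F-"},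
-- }
--
-- def get_county_id(county_name: str) -> Optional[str]:
--     """Single pass: exact match returns at once; first prefix match is kept as fallback."""
--     name_lower = county_name.lower().strip()
--     fallback = None
--     for county_id, info in COUNTIES.items():
--         lowered = info["name"].lower()
--         if lowered == name_lower:
--             return str(county_id)
--         if fallback is None and lowered.startswith(name_lower):
--             fallback = str(county_id)
--     return fallback
-- ===== Notes on version B (the rewrite author's own statement) =====
-- stated objective: simpler
-- what changed: A's two sequential scans of COUNTIES (exact match, then prefix match) are collapsed into one scan that returns immediately on an exact match and remembers the first prefix match as a fallback.
import Mathlib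
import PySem

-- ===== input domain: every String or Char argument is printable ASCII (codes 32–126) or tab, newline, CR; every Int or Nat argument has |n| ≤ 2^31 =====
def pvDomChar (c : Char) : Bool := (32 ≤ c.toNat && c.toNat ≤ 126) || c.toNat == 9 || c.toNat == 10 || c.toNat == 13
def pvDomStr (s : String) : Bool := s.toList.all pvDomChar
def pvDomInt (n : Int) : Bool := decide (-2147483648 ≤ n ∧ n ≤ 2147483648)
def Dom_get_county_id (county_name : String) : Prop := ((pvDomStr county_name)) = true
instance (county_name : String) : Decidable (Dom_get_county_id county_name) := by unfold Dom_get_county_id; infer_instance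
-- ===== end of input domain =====

-- B collapses A's two sequential scans of COUNTIES into one scan that returns on an
-- exact match and remembers the first prefix match as a fallback (objective: simpler).

-- shared module constant COUNTIES: (id, (name, prefix)) in insertion order
def pvCounties : List (Int × String × Option String) :=
  [(1, "Camden", some "FR-"), (2, "Essex", some "F-"), (3, "Burlington", none),
   (6, "Cumberland", some "F-"), (7, "Bergen", some "F-"), (8, "Monmouth", some "F-"),
   (9, "Morris", some "F-"), (10, "Hudson", some "F-"), (15, "Union", some "F-"),
   (17, "Passaic", some "F-"), (19, "Gloucester", some "F-"), (20, "Salem", some "F-"),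
   (25, "Atlantic", some "F-"), (32, "Hunterdon", some "F-"), (52, "Cape May", some "F-"),
   (73, "Middlesex", some "F-")]

-- ===== PORT A =====
-- first loop of A: exact match on lowercased name
def pvExactLoop (n : String) : List (Int × String × Option String) → Option String
  | [] => none
  | (cid, nm, _) :: t =>
      if PySem.Str.lower nm == n then some (PySem.Int.toStr cid) else pvExactLoop n t

-- second loop of A: prefix match
def pvPrefixLoop (n : String) : List (Int × String × Option String) → Option String
  | [] => none
  | (cid, nm, _) :: t =>
      if PySem.Str.startswith (PySem.Str.lower nm) n then some (PySem.Int.toStr cid)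
      else pvPrefixLoop n t

def get_county_id (county_name : String) : Option String :=
  let nameLower := PySem.Str.strip (PySem.Str.lower county_name)
  match pvExactLoop nameLower pvCounties with
  | some r => some r
  | none => pvPrefixLoop nameLower pvCounties

-- ===== PORT B =====
-- B's single pass carrying the remembered fallback
def pvOnePass (n : String) : List (Int × String × Option String) → Option String → Option String
  | [], fb => fb
  | (cid, nm, _) :: t, fb =>
      let lowered := PySem.Str.lower nm
      if lowered == n then some (PySem.Int.toStr cid)
      else pvOnePass n t
        (if fb.isNone && PySem.Str.startswith lowered n then some (PySem.Int.toStr cid) else fb)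

def get_county_id_alt (county_name : String) : Option String :=
  let nameLower := PySem.Str.strip (PySem.Str.lower county_name)
  pvOnePass nameLower pvCounties none

-- ===== PRECONDITION & SPEC =====
def Spec_get_county_id (county_name : String) (out : Option String) : Prop := out = get_county_id_alt county_name
instance (county_name : String) (out : Option String) : Decidable (Spec_get_county_id county_name out) := by unfold Spec_get_county_id; infer_instance

-- ===== CLAIM (what is proved, stated in full; the proofs are below) =====
def Claim_equal_get_county_id : Prop := ∀ (county_name : String), Dom_get_county_id county_name → Spec_get_county_id county_name (get_county_id county_name)

-- ===== LEMMAS AND PROOFS =====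
theorem pvOnePass_eq (n : String) (l : List (Int × String × Option String)) :
    ∀ fb : Option String,
      pvOnePass n l fb =
        match pvExactLoop n l with
        | some x => some x
        | none => fb.or (pvPrefixLoop n l) := by
  induction l with
  | nil => intro fb; cases fb <;> simp [pvOnePass, pvExactLoop, pvPrefixLoop]
  | cons h t ih =>
      intro fb
      obtain ⟨cid, nm, pfx⟩ := h
      simp only [pvOnePass, pvExactLoop, pvPrefixLoop]
      by_cases he : (PySem.Str.lower nm == n) = true
      · simp [he]
      · simp only [he, ih]
        cases hx : pvExactLoop n t <;> cases fb <;> split_ifs <;> simp_all [Option.or]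

-- ===== VERDICT (by name: the statement is the Claim_ definition above) =====
theorem get_county_id_spec : Claim_equal_get_county_id := by
  intro county_name _
  unfold Spec_get_county_id get_county_id get_county_id_alt
  rw [pvOnePass_eq]
  cases hx : pvExactLoop (PySem.Str.strip (PySem.Str.lower county_name)) pvCounties <;>
    simp [hx, Option.or]
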